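-- pv_equiv track=rewrite | github.com/Rilkon/adventofcode | 2024/day25/day25.py | parse
-- ===== SOURCE A (Python) =====
-- def parse(parsedata):
--     keys = []
--     locks = []
--     for line in map(str.split, parsedata.split("\n\n")):
--         if line[0][0] == "#":
--             locks.append([column.count("#") - 1 for column in list(zip(*line))])
--         else:
--             keys.append([column.count("#") - 1 for column in list(zip(*line))])
--     return keys, locks
-- ===== SOURCE B (Python) =====
-- def parse(parsedata):
--     keys = []
--     locks = []
--     for block in parsedata.split("\n\n"):
--         rows = block.split()
--         # hash index built once: column index of every '#' in the block
--         cols = [j for r in rows for j, ch in enumerate(r) if ch == "#"]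
--         tally = {}
--         for j in cols:
--             tally[j] = tally.get(j, 0) + 1
--         ncols = min(map(len, rows))
--         heights = [tally.get(j, 0) - 1 for j in range(ncols)]
--         (locks if rows[0][0] == "#" else keys).append(heights)
--     return keys, locks
-- ===== Notes on version B (the rewrite author's own statement) =====
-- stated objective: alternative
-- what changed: Replaces A's zip(*rows) transpose followed by a per-column count('#') scan with a hash index: one enumerate pass per block collects the column indices of every '#' into a dict of tallies, and the heights are then emitted by dict lookup over range(min row length); the transpose and the per-column scans disappear.
import Mathlib
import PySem

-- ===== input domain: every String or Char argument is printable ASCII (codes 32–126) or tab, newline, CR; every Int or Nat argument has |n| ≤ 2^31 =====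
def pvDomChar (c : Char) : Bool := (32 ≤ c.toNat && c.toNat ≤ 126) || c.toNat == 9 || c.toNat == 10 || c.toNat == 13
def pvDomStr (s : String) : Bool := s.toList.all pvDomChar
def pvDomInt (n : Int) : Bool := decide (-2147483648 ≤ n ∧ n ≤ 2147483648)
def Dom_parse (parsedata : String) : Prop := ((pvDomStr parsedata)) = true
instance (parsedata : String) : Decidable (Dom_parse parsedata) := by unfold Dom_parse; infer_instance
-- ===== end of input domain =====

-- B replaces A's zip-transpose-then-count-per-column by a hash index (a dict of column
-- tallies built in one enumerate pass per block); the transpose and the per-column scans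
-- disappear (objective: alternative).

-- ===== PORT A =====
-- number of columns zip(*rows) keeps: the length of the shortest row (0 for no rows)
def pvNcols (rows : List (List Char)) : Nat := ((rows.map List.length).min?).getD 0

-- list(zip(*rows)): the list of columns, truncated to the shortest row.
-- r.getD j ' ' is r[j]; it is in range because j < pvNcols rows ≤ r.length.
def pvZipStar (rows : List (List Char)) : List (List Char) :=
  (List.range (pvNcols rows)).map (fun j => rows.map (fun r => r.getD j ' '))

def parse (parsedata : String) : List (List Int) × List (List Int) :=
  (PySem.Chars.splitOn parsedata.toList "\n\n".toList).foldl
    (fun acc block =>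
      let line := PySem.Chars.split₀ block
      -- line[0][0]: in range under Pre_parse (each block has at least one token)
      if (line.headD []).headD ' ' == '#' then
        (acc.1, acc.2 ++ [(pvZipStar line).map (fun column => ((column.count '#' : Int)) - 1)])
      else
        (acc.1 ++ [(pvZipStar line).map (fun column => ((column.count '#' : Int)) - 1)], acc.2))
    ([], [])

-- ===== PORT B =====
-- [j for r in rows for j, ch in enumerate(r) if ch == "#"]
def pvCols (rows : List (List Char)) : List Int :=
  rows.flatMap (fun r =>
    (PySem.List.enumerate r).filterMap (fun p => if p.2 == '#' then some p.1 else none))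

def parse_alt (parsedata : String) : List (List Int) × List (List Int) :=
  (PySem.Chars.splitOn parsedata.toList "\n\n".toList).foldl
    (fun acc block =>
      let rows := PySem.Chars.split₀ block
      let cols := pvCols rows
      let tally := cols.foldl (fun d j => d.modify j 0 (· + 1))
        (PySem.Dict.empty : PySem.Dict Int Int)
      -- min(map(len, rows)): raises on empty rows (excluded by Pre_parse); min?.getD 0 here
      let ncols := ((rows.map (fun r => (r.length : Int))).min?).getD 0
      let heights := (PySem.List.pyRange 0 ncols 1).map (fun j => tally.getD j 0 - 1)
      -- rows[0][0]: in range under Pre_parse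
      if (rows.headD []).headD ' ' == '#' then (acc.1, acc.2 ++ [heights])
      else (acc.1 ++ [heights], acc.2))
    ([], [])

-- ===== PRECONDITION & SPEC =====
-- Pre_parse excludes inputs with a whitespace-only (or empty) "\n\n"-block: there both
-- Pythons raise (A an IndexError at line[0][0], B a ValueError at min of an empty sequence).
def Pre_parse (parsedata : String) : Prop :=
  ∀ block ∈ PySem.Chars.splitOn parsedata.toList "\n\n".toList,
    PySem.Chars.split₀ block ≠ []
instance (parsedata : String) : Decidable (Pre_parse parsedata) := by unfold Pre_parse; infer_instance

def pvWitness_parse : String := "#\n.\n\n.\n#"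

def Spec_parse (parsedata : String) (out : List (List Int) × List (List Int)) : Prop := out = parse_alt parsedata
instance (parsedata : String) (out : List (List Int) × List (List Int)) : Decidable (Spec_parse parsedata out) := by unfold Spec_parse; infer_instance

-- ===== CLAIM (what is proved, stated in full; the proofs are below) =====
def Claim_equal_parse : Prop := ∀ (parsedata : String), Dom_parse parsedata → Pre_parse parsedata → Spec_parse parsedata (parse parsedata)

-- ===== LEMMAS AND PROOFS =====

-- every index emitted for a row enumerated from s is at least s
theorem pvRow_lb (r : List Char) (s : Int) :
    ∀ x ∈ (PySem.List.enumerate r s).filterMap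
        (fun p => if p.2 == '#' then some p.1 else none), s ≤ x := by
  induction r generalizing s with
  | nil => simp [PySem.List.enumerate_nil]
  | cons c r ih =>
    intro x hx
    rw [PySem.List.enumerate_cons, List.filterMap_cons] at hx
    by_cases hc : (c == '#') = true
    · simp only [hc, if_pos] at hx
      rcases List.mem_cons.mp hx with rfl | hx
      · omega
      · have := ih (s + 1) x hx; omega
    · rw [if_neg hc] at hx
      have := ih (s + 1) x hx; omega

-- a row contributes the index s+j exactly once, iff its j-th char is '#'
theorem pvRow_count (r : List Char) (s : Int) (j : Nat) :
    ((PySem.List.enumerate r s).filterMap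
        (fun p => if p.2 == '#' then some p.1 else none)).count (s + j)
      = if j < r.length ∧ r.getD j ' ' == '#' then 1 else 0 := by
  induction r generalizing s j with
  | nil => simp [PySem.List.enumerate_nil]
  | cons c r ih =>
    rw [PySem.List.enumerate_cons, List.filterMap_cons]
    cases j with
    | zero =>
      have hz : ((PySem.List.enumerate r (s + 1)).filterMap
          (fun p => if p.2 == '#' then some p.1 else none)).count (s + (0 : Nat)) = 0 := by
        rw [List.count_eq_zero]
        intro hmem
        have := pvRow_lb r (s + 1) _ hmem
        omega
      by_cases hc : (c == '#') = true
      · simp only [hc, if_pos, List.count_cons, hz]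
        simp [hc]
      · rw [if_neg hc, hz]
        have : ¬ ((0 : Nat) < (c :: r).length ∧ (c :: r).getD 0 ' ' == '#') := by
          simp only [List.getD_cons_zero]
          exact fun h => hc h.2
        rw [if_neg this]
    | succ j =>
      have harith : s + (j.succ : Nat) = (s + 1) + (j : Nat) := by push_cast; ring
      have hne : ¬ (s == s + ((j.succ : Nat) : Int)) = true := by simp; omega
      have htail := ih (s + 1) j
      by_cases hc : (c == '#') = true
      · simp only [hc, if_pos, List.count_cons]
        rw [if_neg hne, harith, htail]
        simp
      · rw [if_neg hc, harith, htail]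
        simp

-- the block-wide index list counts column j once per row whose j-th char is '#'
theorem pvCols_count (rows : List (List Char)) (j : Nat) (hj : ∀ r ∈ rows, j < r.length) :
    (pvCols rows).count ((j : Nat) : Int) = rows.countP (fun r => r.getD j ' ' == '#') := by
  induction rows with
  | nil => simp [pvCols]
  | cons r rows ih =>
    simp only [pvCols, List.flatMap_cons, List.count_append, List.countP_cons] at ih ⊢
    rw [show ((j : Nat) : Int) = 0 + (j : Nat) by omega, pvRow_count r 0 j]
    rw [show (0 : Int) + (j : Nat) = ((j : Nat) : Int) by omega]
    rw [ih (fun r hr => hj r (List.mem_cons_of_mem _ hr))]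
    have hlen := hj r List.mem_cons_self
    by_cases hc : (r.getD j ' ' == '#') = true
    · rw [if_pos ⟨hlen, hc⟩, if_pos hc]; omega
    · rw [if_neg (fun h => hc h.2), if_neg hc]; omega

-- cast commutes with the running minimum
theorem pvFoldMin_cast (rows : List (List Char)) (a : Nat) :
    (rows.map (fun r => (r.length : Int))).foldl min (a : Int)
      = (((rows.map List.length).foldl min a : Nat) : Int) := by
  induction rows generalizing a with
  | nil => simp
  | cons r rows ih =>
    simp only [List.map_cons, List.foldl_cons]
    rw [← Nat.cast_min, ih]

-- the min of the rows' lengths, as Python's int min, is pvNcols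
theorem pvMin_cast (rows : List (List Char)) :
    (((rows.map (fun r => (r.length : Int))).min?).getD 0) = (pvNcols rows : Int) := by
  cases rows with
  | nil => simp [pvNcols]
  | cons r rows =>
    simp only [pvNcols, List.map_cons, List.min?_cons', Option.getD_some]
    exact pvFoldMin_cast rows r.length

-- each row is at least pvNcols long
theorem pvNcols_le (rows : List (List Char)) (r : List Char) (hr : r ∈ rows) :
    pvNcols rows ≤ r.length := by
  simp only [pvNcols]
  rcases hm : (rows.map List.length).min? with _ | m
  · rw [List.min?_eq_none_iff] at hm
    have hnil : rows = [] := by simpa using hm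
    rw [hnil] at hr; cases hr
  · obtain ⟨-, hle⟩ := List.min?_eq_some_iff.mp hm
    simpa using hle r.length (by simpa using ⟨r, hr, rfl⟩)

-- the per-block value of B equals the per-block value of A
theorem pvBlock_eq (rows : List (List Char)) :
    (PySem.List.pyRange 0 (((rows.map (fun r => (r.length : Int))).min?).getD 0) 1).map
        (fun j => ((pvCols rows).foldl (fun d j => d.modify j 0 (· + 1))
            (PySem.Dict.empty : PySem.Dict Int Int)).getD j 0 - 1)
      = (pvZipStar rows).map (fun column => ((column.count '#' : Int)) - 1) := by
  rw [pvMin_cast, PySem.List.pyRange_one]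
  simp only [pvZipStar, List.map_map]
  rw [show ((pvNcols rows : Int) - 0).toNat = pvNcols rows by omega]
  apply List.map_congr_left
  intro j hj
  have hj' : j < pvNcols rows := List.mem_range.mp hj
  simp only [Function.comp, zero_add]
  rw [PySem.Dict.getD_foldl_modify_add_one,
      pvCols_count rows j (fun r hr => lt_of_lt_of_le hj' (pvNcols_le rows r hr))]
  have hcnt : (rows.map fun r => r.getD j ' ').count '#' =
      rows.countP (fun r => r.getD j ' ' == '#') := by
    rw [List.count_eq_countP, List.countP_map]
    apply List.countP_congr
    intro r _
    cases r <;> simp [Function.comp]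
  rw [← hcnt]
  simp

-- ===== VERDICT (by name: the statement is the Claim_ definition above) =====
theorem parse_spec : Claim_equal_parse := by
  intro parsedata _ _
  show parse parsedata = parse_alt parsedata
  unfold parse parse_alt
  congr 1
  funext acc block
  simp only []
  rw [pvBlock_eq]
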